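-- pv_equiv track=rewrite | github.com/devgsk2023/vsr-mobile | mapa/mapa/normalize_data.py | capitalize_word
-- ===== SOURCE A (Python) =====
-- def capitalize_word(word):
--     """Capitaliza una palabra respetando acentos y caracteres especiales."""
--     if not word:
--         return word
--
--     # Si tiene paréntesis al inicio, capitalizar lo de adentro
--     if word.startswith("(") and len(word) > 1:
--         return "(" + capitalize_word(word[1:])
--
--     # Si contiene guión, capitalizar cada parte por separado
--     if "-" in word and len(word) > 1:
--         parts = word.split("-")
--         return "-".join(capitalize_word(p) for p in parts)
--
--     # Si contiene barra, capitalizar cada parte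
--     if "/" in word and len(word) > 1:
--         parts = word.split("/")
--         return "/".join(capitalize_word(p) for p in parts)
--
--     # Capitalizar primera letra, resto en minúscula
--     return word[0].upper() + word[1:].lower()
-- ===== SOURCE B (Python) =====
-- def capitalize_word(word):
--     """Iterative single pass: tokenize on '-'/'/' keeping delimiters, flush chunks."""
--     if not word:
--         return word
--     out = []
--     chunk = []
--
--     def flush():
--         s = ''.join(chunk)
--         chunk.clear()
--         if not s:
--             return
--         k = 0
--         while k < len(s) - 1 and s[k] == '(':
--             k += 1
--         out.append(s[:k] + s[k].upper() + s[k + 1:].lower())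
--
--     for ch in word:
--         if ch == '-' or ch == '/':
--             flush()
--             out.append(ch)
--         else:
--             chunk.append(ch)
--     flush()
--     return ''.join(out)
-- ===== Notes on version B (the rewrite author's own statement) =====
-- stated objective: alternative
-- what changed: Replaces A's recursion (peel leading '(', recursively split/join on '-' then '/') with a single iterative left-to-right pass that keeps a current chunk, flushes it at each '-'/'/' delimiter (counting leading '(' capped at len-1, then upper-casing the next char and lower-casing the rest), and concatenates the pieces.
import Mathlib
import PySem

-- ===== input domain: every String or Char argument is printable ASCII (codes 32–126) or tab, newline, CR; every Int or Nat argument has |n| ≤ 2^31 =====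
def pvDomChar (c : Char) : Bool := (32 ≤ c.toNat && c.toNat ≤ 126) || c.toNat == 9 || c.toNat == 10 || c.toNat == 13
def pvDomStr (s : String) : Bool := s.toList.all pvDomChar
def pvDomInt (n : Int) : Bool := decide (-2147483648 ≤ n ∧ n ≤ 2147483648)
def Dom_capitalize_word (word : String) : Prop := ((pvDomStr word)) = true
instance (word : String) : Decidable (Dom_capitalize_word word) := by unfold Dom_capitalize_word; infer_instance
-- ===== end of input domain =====

-- B replaces A's recursion (peel '(' / split on '-' / split on '/' recursively) by one
-- iterative left-to-right pass that flushes chunks at '-' and '/' delimiters (objective: alternative).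

-- ===== PORT A =====
-- A-side helpers: a structural characterisation of PySem.Chars.splitOn for a one-char
-- separator, needed (only) to justify capA's termination on the split branches.
def pvSplitP (c : Char) : List Char → List (List Char)
  | [] => [[]]
  | x :: r =>
    match pvSplitP c r with
    | [] => [[x]]
    | p :: ps => if x = c then [] :: p :: ps else (x :: p) :: ps

theorem pvSplitP_ne_nil (c : Char) (l : List Char) : pvSplitP c l ≠ [] := by
  cases l with
  | nil => simp [pvSplitP]
  | cons x r =>
    simp only [pvSplitP]
    cases pvSplitP c r with
    | nil => simp
    | cons p ps => split_ifs <;> simp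

theorem pvGo_eq (c : Char) : ∀ (fuel : Nat) (l cur : List Char) (acc : List (List Char)),
    l.length < fuel →
    PySem.Chars.splitOn.go [c] fuel l cur acc =
      acc.reverse ++ (cur.reverse ++ (pvSplitP c l).headI) :: (pvSplitP c l).tail := by
  intro fuel
  induction fuel with
  | zero => intro l cur acc h; omega
  | succ n ih =>
    intro l cur acc h
    cases l with
    | nil => simp [PySem.Chars.splitOn.go, pvSplitP]
    | cons x r =>
      have hstep : PySem.Chars.splitOn.go [c] (n+1) (x::r) cur acc =
          if [c].isPrefixOf (x::r) then
            PySem.Chars.splitOn.go [c] n ((x::r).drop 1) [] (cur.reverse :: acc)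
          else PySem.Chars.splitOn.go [c] n r (x :: cur) acc := by
        simp [PySem.Chars.splitOn.go, List.isPrefixOf]
      rw [hstep]
      have hr : r.length < n := by simp at h; omega
      by_cases hx : x = c
      · rw [if_pos (by simp [List.isPrefixOf, hx])]
        simp only [List.drop_succ_cons, List.drop_zero]
        rw [ih r [] (cur.reverse :: acc) hr]
        cases hps : pvSplitP c r with
        | nil => exact absurd hps (pvSplitP_ne_nil c r)
        | cons p ps => simp [pvSplitP, hps, hx]
      · rw [if_neg (by simp [List.isPrefixOf]; exact fun hxc => hx hxc.symm)]
        rw [ih r (x :: cur) acc hr]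
        cases hps : pvSplitP c r with
        | nil => exact absurd hps (pvSplitP_ne_nil c r)
        | cons p ps => simp [pvSplitP, hps, hx]

theorem pvSplitOn_eq (c : Char) (l : List Char) :
    PySem.Chars.splitOn l [c] = pvSplitP c l := by
  show PySem.Chars.splitOn.go [c] (l.length + 1) l [] [] = _
  rw [pvGo_eq c (l.length + 1) l [] [] (by omega)]
  cases hps : pvSplitP c l with
  | nil => exact absurd hps (pvSplitP_ne_nil c l)
  | cons p ps => simp

theorem pvMem_splitP_le (c : Char) : ∀ {l p : List Char}, p ∈ pvSplitP c l →
    p.length ≤ l.length := by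
  intro l
  induction l with
  | nil => intro p h; simp [pvSplitP] at h; simp [h]
  | cons x r ih =>
    intro p h
    cases hps : pvSplitP c r with
    | nil => exact absurd hps (pvSplitP_ne_nil c r)
    | cons q qs =>
      simp only [pvSplitP, hps] at h
      split_ifs at h with hx
      · rcases List.mem_cons.mp h with h0 | h1
        · simp [h0]
        · have := ih (hps ▸ h1)
          simp; omega
      · rcases List.mem_cons.mp h with h0 | h1
        · have hq : q ∈ pvSplitP c r := by rw [hps]; exact List.mem_cons_self
          have := ih hq
          simp [h0]; omega
        · have : p ∈ pvSplitP c r := by rw [hps]; exact List.mem_cons_of_mem _ h1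
          have := ih this
          simp; omega

theorem pvMem_splitP_lt (c : Char) : ∀ {l p : List Char}, c ∈ l → p ∈ pvSplitP c l →
    p.length < l.length := by
  intro l
  induction l with
  | nil => intro p hc; simp at hc
  | cons x r ih =>
    intro p hc h
    cases hps : pvSplitP c r with
    | nil => exact absurd hps (pvSplitP_ne_nil c r)
    | cons q qs =>
      simp only [pvSplitP, hps] at h
      split_ifs at h with hx
      · rcases List.mem_cons.mp h with h0 | h1
        · simp [h0]
        · have := pvMem_splitP_le c (hps ▸ h1)
          simp; omega
      · have hcr : c ∈ r := by
          rcases List.mem_cons.mp hc with h0 | h1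
          · exact absurd h0.symm hx
          · exact h1
        rcases List.mem_cons.mp h with h0 | h1
        · have hq : q ∈ pvSplitP c r := by rw [hps]; exact List.mem_cons_self
          have := ih hcr hq
          simp [h0]; omega
        · have hm : p ∈ pvSplitP c r := by rw [hps]; exact List.mem_cons_of_mem _ h1
          have := ih hcr hm
          simp; omega

theorem pvIsIn_singleton (c : Char) (l : List Char) :
    PySem.Chars.isIn [c] l = true ↔ c ∈ l := by
  rw [PySem.Chars.isIn_iff_infix]
  constructor
  · rintro ⟨s, t, rfl⟩; simp
  · intro h
    obtain ⟨s, t, rfl⟩ := List.append_of_mem h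
    exact ⟨s, t, by simp⟩

-- the termination lemma capA cites on the split branches
theorem pvSplitOn_part_lt (c : Char) {l p : List Char}
    (hc : PySem.Chars.isIn [c] l = true) (h : p ∈ PySem.Chars.splitOn l [c]) :
    p.length < l.length := by
  rw [pvSplitOn_eq] at h
  exact pvMem_splitP_lt c ((pvIsIn_singleton c l).mp hc) h

def capA (l : List Char) : List Char :=
  if _h0 : l = [] then l
  else if _h1 : PySem.Chars.startswith l ['('] = true ∧ 1 < l.length then
    '(' :: capA (PySem.List.slice l (some 1) none)
  else if _h2 : PySem.Chars.isIn ['-'] l = true ∧ 1 < l.length then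
    PySem.Chars.join ['-'] ((PySem.Chars.splitOn l ['-']).attach.map (fun p => capA p.1))
  else if _h3 : PySem.Chars.isIn ['/'] l = true ∧ 1 < l.length then
    PySem.Chars.join ['/'] ((PySem.Chars.splitOn l ['/']).attach.map (fun p => capA p.1))
  else
    -- word[0].upper() + word[1:].lower(); l ≠ [] here, so word[0] is the head
    PySem.Chars.upperChar (l.headD ' ') :: PySem.Chars.lower (PySem.List.slice l (some 1) none)
termination_by l.length
decreasing_by
  · rw [PySem.List.slice_from_one]
    cases l with
    | nil => exact absurd rfl _h0
    | cons x t => simp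
  · exact pvSplitOn_part_lt '-' _h2.1 p.2
  · exact pvSplitOn_part_lt '/' _h3.1 p.2

def capitalize_word (word : String) : String :=
  if word.toList = [] then word else String.ofList (capA word.toList)

-- ===== PORT B =====
-- k = 0; while k < len(s) - 1 and s[k] == '(': k += 1   (s[k] is in range here, so getD is exact)
def peelB (s : List Char) (k : Nat) : Nat :=
  if _h : k < s.length - 1 ∧ s.getD k ' ' = '(' then peelB s (k + 1) else k
termination_by s.length - k
decreasing_by omega

-- flush(): join the chunk; if nonempty, emit s[:k] + s[k].upper() + s[k+1:].lower()
def flushB (s : List Char) : List Char :=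
  if s = [] then []
  else
    let k := peelB s 0
    s.take k ++ PySem.Chars.upperChar (s.getD k ' ') :: PySem.Chars.lower (s.drop (k + 1))

-- the for-loop over the characters, with the current chunk and the (flattened) output pieces
def goB : List Char → List Char → List Char → List Char
  | [], chunk, out => out ++ flushB chunk
  | ch :: rest, chunk, out =>
    if ch = '-' ∨ ch = '/' then goB rest [] (out ++ flushB chunk ++ [ch])
    else goB rest (chunk ++ [ch]) out

def capitalize_word_alt (word : String) : String :=
  if word.toList = [] then word else String.ofList (goB word.toList [] [])

-- ===== PRECONDITION & SPEC =====
def Spec_capitalize_word (word : String) (out : String) : Prop := out = capitalize_word_alt word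
instance (word : String) (out : String) : Decidable (Spec_capitalize_word word out) := by unfold Spec_capitalize_word; infer_instance

-- ===== CLAIM (what is proved, stated in full; the proofs are below) =====
def Claim_equal_capitalize_word : Prop := ∀ (word : String), Dom_capitalize_word word → Spec_capitalize_word word (capitalize_word word)

-- ===== LEMMAS AND PROOFS =====

theorem goB_out (l : List Char) : ∀ chunk out, goB l chunk out = out ++ goB l chunk [] := by
  induction l with
  | nil => intro chunk out; simp [goB]
  | cons ch rest ih =>
    intro chunk out
    by_cases h : ch = '-' ∨ ch = '/'
    · simp only [goB, if_pos h]
      rw [ih [] (out ++ flushB chunk ++ [ch]), ih [] ([] ++ flushB chunk ++ [ch])]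
      simp
    · simp only [goB, if_neg h]
      exact ih (chunk ++ [ch]) out

-- a run of non-delimiter characters is just accumulated into the chunk and flushed
theorem goB_nondelim : ∀ (u : List Char), (∀ ch ∈ u, ¬(ch = '-' ∨ ch = '/')) →
    ∀ chunk out, goB u chunk out = out ++ flushB (chunk ++ u) := by
  intro u
  induction u with
  | nil => intro _ chunk out; simp [goB]
  | cons a u' ih =>
    intro hu chunk out
    have ha : ¬(a = '-' ∨ a = '/') := hu a List.mem_cons_self
    simp only [goB, if_neg ha]
    rw [ih (fun ch hch => hu ch (List.mem_cons_of_mem _ hch)) (chunk ++ [a]) out]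
    simp

-- splitting B's pass at a delimiter
theorem goB_split (d : Char) (hd : d = '-' ∨ d = '/') :
    ∀ (u v chunk out : List Char),
      goB (u ++ d :: v) chunk out = goB u chunk out ++ d :: goB v [] [] := by
  intro u
  induction u with
  | nil =>
    intro v chunk out
    simp only [List.nil_append, goB, if_pos hd]
    rw [goB_out v [] (out ++ flushB chunk ++ [d])]
    simp
  | cons a u' ih =>
    intro v chunk out
    by_cases ha : a = '-' ∨ a = '/'
    · simp only [List.cons_append, goB, if_pos ha]
      exact ih v [] (out ++ flushB chunk ++ [a])
    · simp only [List.cons_append, goB, if_neg ha]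
      exact ih v (chunk ++ [a]) out

theorem pvSplitP_eq_single (c : Char) : ∀ {l : List Char}, c ∉ l → pvSplitP c l = [l] := by
  intro l
  induction l with
  | nil => intro _; rfl
  | cons x r ih =>
    intro hc
    have hx : ¬(x = c) := fun h => hc (h ▸ List.mem_cons_self)
    have hr : c ∉ r := fun h => hc (List.mem_cons_of_mem _ h)
    simp [pvSplitP, ih hr, hx]

theorem pvSplitP_append_cons (c : Char) : ∀ {u : List Char} (v : List Char), c ∉ u →
    pvSplitP c (u ++ c :: v) = u :: pvSplitP c v := by
  intro u
  induction u with
  | nil =>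
    intro v _
    cases hv : pvSplitP c v with
    | nil => exact absurd hv (pvSplitP_ne_nil c v)
    | cons p ps => simp [pvSplitP, hv]
  | cons a u' ih =>
    intro v hc
    have ha : ¬(a = c) := fun h => hc (h ▸ List.mem_cons_self)
    have hu' : c ∉ u' := fun h => hc (List.mem_cons_of_mem _ h)
    simp only [List.cons_append, pvSplitP, ih v hu']
    simp [ha]

theorem pvFirstOcc {c : Char} : ∀ {l : List Char}, c ∈ l →
    ∃ u v, l = u ++ c :: v ∧ c ∉ u := by
  intro l
  induction l with
  | nil => intro h; simp at h
  | cons x r ih =>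
    intro h
    by_cases hx : x = c
    · exact ⟨[], r, by simp [hx], by simp⟩
    · have hr : c ∈ r := by
        rcases List.mem_cons.mp h with h0 | h1
        · exact absurd h0.symm hx
        · exact h1
      obtain ⟨u, v, rfl, hu⟩ := ih hr
      refine ⟨x :: u, v, by simp, ?_⟩
      intro hmem
      rcases List.mem_cons.mp hmem with h0 | h1
      · exact hx h0.symm
      · exact hu h1

-- prepending a character to the first piece prepends it to the join
theorem pvJoin_cons_head (sep : List Char) (x : Char) (p : List Char) (ps : List (List Char)) :
    PySem.Chars.join sep ((x :: p) :: ps) = x :: PySem.Chars.join sep (p :: ps) := by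
  cases ps with
  | nil => simp [PySem.Chars.join_singleton]
  | cons q qs => simp [PySem.Chars.join_cons_cons]

-- B distributes over the one-char split, for both delimiters
theorem goB_join (c : Char) (hc : c = '-' ∨ c = '/') :
    ∀ (n : Nat) (l : List Char), l.length < n →
      goB l [] [] = PySem.Chars.join [c] ((pvSplitP c l).map (fun p => goB p [] [])) := by
  intro n
  induction n with
  | zero => intro l h; omega
  | succ n ih =>
    intro l hl
    by_cases hcl : c ∈ l
    · obtain ⟨u, v, rfl, hcu⟩ := pvFirstOcc hcl
      rw [goB_split c hc u v [] [], pvSplitP_append_cons c v hcu]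
      have hv : v.length < n := by simp at hl; omega
      rw [ih v hv]
      cases hps : pvSplitP c v with
      | nil => exact absurd hps (pvSplitP_ne_nil c v)
      | cons p ps => simp [PySem.Chars.join_cons_cons]
    · rw [pvSplitP_eq_single c hcl]
      simp [PySem.Chars.join_singleton]

theorem peelB_shift (t : List Char) (k : Nat) : peelB ('(' :: t) (k + 1) = peelB t k + 1 := by
  by_cases h : k < t.length - 1 ∧ t.getD k ' ' = '('
  · have hc1 : k + 1 < ('(' :: t).length - 1 ∧ ('(' :: t).getD (k + 1) ' ' = '(' := by
      refine ⟨?_, ?_⟩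
      · simp only [List.length_cons]; omega
      · simpa using h.2
    rw [peelB, dif_pos hc1, peelB_shift t (k + 1)]
    conv_rhs => rw [peelB]
    rw [dif_pos h]
  · have hc1 : ¬(k + 1 < ('(' :: t).length - 1 ∧ ('(' :: t).getD (k + 1) ' ' = '(') := by
      intro hk
      refine h ⟨?_, ?_⟩
      · have := hk.1; simp only [List.length_cons] at this; omega
      · simpa using hk.2
    rw [peelB, dif_neg hc1]
    conv_rhs => rw [peelB]
    rw [dif_neg h]
termination_by t.length - k

theorem flushB_paren {t : List Char} (ht : t ≠ []) : flushB ('(' :: t) = '(' :: flushB t := by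
  have hlen : 0 < t.length := List.length_pos_iff.mpr ht
  have hc : 0 < ('(' :: t).length - 1 ∧ ('(' :: t).getD 0 ' ' = '(' := by
    refine ⟨?_, rfl⟩
    simp only [List.length_cons]; omega
  have hk0 : peelB ('(' :: t) 0 = peelB t 0 + 1 := by
    rw [peelB, dif_pos hc]
    exact peelB_shift t 0
  rw [flushB, flushB, if_neg (by simp), if_neg ht]
  simp only [hk0, List.take_succ_cons, List.getD_cons_succ, List.drop_succ_cons]
  simp

theorem goB_paren : ∀ (n : Nat) (t : List Char), t.length < n →
    goB ('(' :: t) [] [] = '(' :: goB t [] [] := by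
  intro n
  induction n with
  | zero => intro t h; omega
  | succ n ih =>
    intro t ht
    by_cases h1 : '-' ∈ t
    · rw [goB_join '-' (Or.inl rfl) (t.length + 2) ('(' :: t) (by simp),
        goB_join '-' (Or.inl rfl) (t.length + 1) t (by omega)]
      cases hps : pvSplitP '-' t with
      | nil => exact absurd hps (pvSplitP_ne_nil '-' t)
      | cons p ps =>
        have hsp : pvSplitP '-' ('(' :: t) = ('(' :: p) :: ps := by
          simp [pvSplitP, hps]
        rw [hsp]
        have hp : p.length < n := by
          have hm : p ∈ pvSplitP '-' t := by rw [hps]; exact List.mem_cons_self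
          have := pvMem_splitP_lt '-' h1 hm
          omega
        simp only [List.map_cons]
        rw [show goB ('(' :: p) [] [] = '(' :: goB p [] [] from ih p hp]
        exact pvJoin_cons_head ['-'] '(' (goB p [] []) (List.map (fun q => goB q [] []) ps)
    · by_cases h2 : '/' ∈ t
      · rw [goB_join '/' (Or.inr rfl) (t.length + 2) ('(' :: t) (by simp),
          goB_join '/' (Or.inr rfl) (t.length + 1) t (by omega)]
        cases hps : pvSplitP '/' t with
        | nil => exact absurd hps (pvSplitP_ne_nil '/' t)
        | cons p ps =>
          have hsp : pvSplitP '/' ('(' :: t) = ('(' :: p) :: ps := by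
            simp [pvSplitP, hps]
          rw [hsp]
          have hp : p.length < n := by
            have hm : p ∈ pvSplitP '/' t := by rw [hps]; exact List.mem_cons_self
            have := pvMem_splitP_lt '/' h2 hm
            omega
          simp only [List.map_cons]
          rw [show goB ('(' :: p) [] [] = '(' :: goB p [] [] from ih p hp]
          exact pvJoin_cons_head ['/'] '(' (goB p [] []) (List.map (fun q => goB q [] []) ps)
      · have hnd : ∀ ch ∈ '(' :: t, ¬(ch = '-' ∨ ch = '/') := by
          intro ch hch
          rcases List.mem_cons.mp hch with h0 | hmem
          · subst h0; decide
          · rintro (rfl | rfl)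
            · exact h1 hmem
            · exact h2 hmem
        rw [goB_nondelim ('(' :: t) hnd [] [],
          goB_nondelim t (fun ch hch => hnd ch (List.mem_cons_of_mem _ hch)) [] []]
        cases ht0 : t with
        | nil =>
          have hup : PySem.Chars.upperChar '(' = '(' := by decide
          have hkp : peelB ['('] 0 = 0 := by rw [peelB]; simp
          have hf1 : flushB ['('] = ['('] := by
            simp [flushB, hkp, hup, PySem.Chars.lower]
          have hf2 : flushB ([] : List Char) = [] := by simp [flushB]
          simp [hf1, hf2]
        | cons a r =>
          simp only [List.nil_append]
          exact flushB_paren (by simp)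

theorem capA_eq_goB : ∀ (n : Nat) (l : List Char), l.length < n → capA l = goB l [] [] := by
  intro n
  induction n with
  | zero => intro l h; omega
  | succ n ihn =>
    intro l hl
    rw [capA]
    split_ifs with h0 h1 h2 h3
    · subst h0; simp [goB, flushB]
    · obtain ⟨r, hr⟩ := (PySem.Chars.startswith_iff l ['(']).mp h1.1
      obtain rfl : l = '(' :: r := hr.symm
      rw [PySem.List.slice_from_one]
      have hrn : r.length < n := by simp at hl; omega
      rw [show ('(' :: r).tail = r from rfl, ihn r hrn,
        goB_paren (r.length + 1) r (by omega)]
    · rw [pvSplitOn_eq]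
      have hmem : '-' ∈ l := (pvIsIn_singleton '-' l).mp h2.1
      rw [goB_join '-' (Or.inl rfl) (l.length + 1) l (by omega)]
      have hattach : ((pvSplitP '-' l).attach.map (fun p => capA p.1)) =
          (pvSplitP '-' l).map capA := by simp
      rw [hattach]
      congr 1
      apply List.map_congr_left
      intro p hp
      have : p.length < n := by
        have := pvMem_splitP_lt '-' hmem hp
        omega
      exact ihn p this
    · rw [pvSplitOn_eq]
      have hmem : '/' ∈ l := (pvIsIn_singleton '/' l).mp h3.1
      rw [goB_join '/' (Or.inr rfl) (l.length + 1) l (by omega)]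
      have hattach : ((pvSplitP '/' l).attach.map (fun p => capA p.1)) =
          (pvSplitP '/' l).map capA := by simp
      rw [hattach]
      congr 1
      apply List.map_congr_left
      intro p hp
      have : p.length < n := by
        have := pvMem_splitP_lt '/' hmem hp
        omega
      exact ihn p this
    · cases l with
      | nil => exact absurd rfl h0
      | cons x t =>
        cases t with
        | nil =>
          rw [PySem.List.slice_from_one]
          by_cases hx : x = '-' ∨ x = '/'
          · have hxu : PySem.Chars.upperChar x = x := by
              rcases hx with rfl | rfl <;> decide
            simp [goB, hx, flushB, hxu, PySem.Chars.lower]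
          · have hk : peelB [x] 0 = 0 := by rw [peelB]; simp
            simp [goB, hx, flushB, hk, PySem.Chars.lower]
        | cons y t' =>
          have hlen : 1 < (x :: y :: t').length := by simp
          have hnotin1 : '-' ∉ (x :: y :: t') := fun hm =>
            h2 ⟨(pvIsIn_singleton '-' _).mpr hm, hlen⟩
          have hnotin2 : '/' ∉ (x :: y :: t') := fun hm =>
            h3 ⟨(pvIsIn_singleton '/' _).mpr hm, hlen⟩
          have hxp : ¬(x = '(') := by
            intro hx
            exact h1 ⟨(PySem.Chars.startswith_iff _ _).mpr ⟨y :: t', by rw [hx]; rfl⟩, hlen⟩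
          have hnd : ∀ ch ∈ (x :: y :: t'), ¬(ch = '-' ∨ ch = '/') := by
            intro ch hch
            rintro (rfl | rfl)
            · exact hnotin1 hch
            · exact hnotin2 hch
          rw [goB_nondelim _ hnd [] []]
          simp only [List.nil_append]
          rw [flushB, if_neg (by simp)]
          have hk : peelB (x :: y :: t') 0 = 0 := by
            rw [peelB, dif_neg (fun hcond => hxp (by simpa using hcond.2))]
          rw [PySem.List.slice_from_one]
          simp [hk]

-- ===== VERDICT (by name: the statement is the Claim_ definition above) =====
theorem capitalize_word_spec : Claim_equal_capitalize_word := by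
  intro word _
  unfold Spec_capitalize_word capitalize_word capitalize_word_alt
  split_ifs with h
  · rfl
  · exact congrArg String.ofList (capA_eq_goB (word.toList.length + 1) word.toList (by omega))
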